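-- pv_equiv track=rewrite | github.com/sukunenv/redis-from-scratch-python | app/protocol.py | format_xread_data
-- ===== SOURCE A (Python) =====
-- def format_xread_data(data):
--     """
--     Formats internal stream data into a complex nested RESP Array.
--     Used specifically for responding to XREAD commands.
--     """
--     if not data: return "*-1\r\n"
--     res = f"*{len(data)}\r\n"
--     for stream_name, entries in data:
--         # Structure: [ [stream_name, [ [entry_id, [field_data]] ] ] ]
--         res += f"*2\r\n${len(stream_name)}\r\n{stream_name}\r\n*{len(entries)}\r\n"
--         for entry_id, fields in entries:
--             res += f"*2\r\n${len(entry_id)}\r\n{entry_id}\r\n*{len(fields)*2}\r\n"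
--             for field_name, field_value in fields.items():
--                 res += f"${len(field_name)}\r\n{field_name}\r\n${len(field_value)}\r\n{field_value}\r\n"
--     return res
-- ===== SOURCE B (Python) =====
-- def format_xread_data(data):
--     """Build a nested list tree, then serialize it with one explicit-stack
--     while loop (iterative preorder token emission, joined once)."""
--     if not data:
--         return "*-1\r\n"
--     tree = [
--         [stream_name,
--          [[entry_id, [x for kv in fields.items() for x in kv]]
--           for entry_id, fields in entries]]
--         for stream_name, entries in data
--     ]
--     out = []
--     stack = [tree]
--     while stack:
--         v = stack.pop()
--         if isinstance(v, str):
--             out.append(f"${len(v)}\r\n{v}\r\n")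
--         else:
--             out.append(f"*{len(v)}\r\n")
--             stack.extend(reversed(v))
--     return "".join(out)
-- ===== Notes on version B (the rewrite author's own statement) =====
-- stated objective: alternative
-- what changed: Replaced A's three nested loops mutating one string accumulator by a build-then-serialize design: B first builds a nested-list tree, then serializes it with a single explicit-stack while loop that pops a node, emits one token, and pushes its children in reverse, joining all tokens once.
import Mathlib
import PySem

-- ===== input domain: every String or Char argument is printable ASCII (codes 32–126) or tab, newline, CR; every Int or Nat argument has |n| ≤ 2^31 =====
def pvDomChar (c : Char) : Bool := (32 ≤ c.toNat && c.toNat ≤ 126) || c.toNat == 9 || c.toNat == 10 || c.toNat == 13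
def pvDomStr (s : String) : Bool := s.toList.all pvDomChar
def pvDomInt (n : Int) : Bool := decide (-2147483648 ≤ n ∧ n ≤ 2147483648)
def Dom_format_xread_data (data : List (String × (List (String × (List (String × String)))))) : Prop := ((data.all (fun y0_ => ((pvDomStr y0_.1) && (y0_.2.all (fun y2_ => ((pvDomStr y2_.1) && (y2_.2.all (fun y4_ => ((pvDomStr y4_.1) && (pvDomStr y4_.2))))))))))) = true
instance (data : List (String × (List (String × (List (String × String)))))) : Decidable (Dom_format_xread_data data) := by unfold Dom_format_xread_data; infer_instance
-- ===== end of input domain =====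

-- B builds a nested-list tree, then serializes it with ONE explicit-stack loop (iterative preorder
-- token emission, joined once) instead of A's three nested loops mutating a string accumulator.

-- ===== PORT A =====
def format_xread_data (data : List (String × (List (String × (List (String × String)))))) : String :=
  if data = [] then "*-1\r\n" else
  data.foldl (fun res p =>
    let res := res ++ ("*2\r\n$" ++ PySem.Int.toStr (PySem.Str.len p.1) ++ "\r\n" ++ p.1 ++ "\r\n*" ++ PySem.Int.toStr (PySem.List.len p.2) ++ "\r\n")
    p.2.foldl (fun res q =>
      let res := res ++ ("*2\r\n$" ++ PySem.Int.toStr (PySem.Str.len q.1) ++ "\r\n" ++ q.1 ++ "\r\n*" ++ PySem.Int.toStr (PySem.List.len q.2 * 2) ++ "\r\n")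
      q.2.foldl (fun res f =>
        res ++ ("$" ++ PySem.Int.toStr (PySem.Str.len f.1) ++ "\r\n" ++ f.1 ++ "\r\n$" ++ PySem.Int.toStr (PySem.Str.len f.2) ++ "\r\n" ++ f.2 ++ "\r\n")) res) res)
    ("*" ++ PySem.Int.toStr (PySem.List.len data) ++ "\r\n")

-- ===== PORT B =====
-- Python B's stack holds dynamically-typed values (str or list at each tree depth); Lean is typed,
-- so the stack elements carry an explicit tag per possible node shape — the loop itself is the same
-- pop / emit-one-token / push-reversed-children worklist as Source B's while loop (exact hand port).
inductive PvNode where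
  | bulk    : String → PvNode                                                    -- a leaf string
  | flat    : List String → PvNode                                               -- flattened field list
  | entry   : String × List String → PvNode                                      -- [entry_id, flat]
  | entries : List (String × List String) → PvNode                               -- entries list
  | stream  : String × List (String × List String) → PvNode                      -- [name, entries]
  | streams : List (String × List (String × List String)) → PvNode               -- the whole tree
deriving DecidableEq, Repr

-- the token Python appends for a popped value, and the children it pushes (reversed push + pop = in order)
def pvExpand : PvNode → String × List PvNode
  | .bulk s     => ("$" ++ PySem.Int.toStr (PySem.Str.len s) ++ "\r\n" ++ s ++ "\r\n", [])
  | .flat l     => ("*" ++ PySem.Int.toStr (PySem.List.len l) ++ "\r\n", l.map .bulk)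
  | .entry q    => ("*" ++ PySem.Int.toStr (PySem.List.len [q.1, ""]) ++ "\r\n", [.bulk q.1, .flat q.2])
  | .entries l  => ("*" ++ PySem.Int.toStr (PySem.List.len l) ++ "\r\n", l.map .entry)
  | .stream p   => ("*" ++ PySem.Int.toStr (PySem.List.len [p.1, ""]) ++ "\r\n", [.bulk p.1, .entries p.2])
  | .streams l  => ("*" ++ PySem.Int.toStr (PySem.List.len l) ++ "\r\n", l.map .stream)

-- tokens eventually produced by a node (termination measure for the worklist loop)
def pvSize : PvNode → Nat
  | .bulk _     => 1
  | .flat l     => 1 + l.length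
  | .entry q    => 3 + q.2.length
  | .entries l  => 1 + (l.map (fun q => 3 + q.2.length)).sum
  | .stream p   => 3 + (p.2.map (fun q => 3 + q.2.length)).sum
  | .streams l  => 1 + (l.map (fun p => 3 + (p.2.map (fun q => 3 + q.2.length)).sum)).sum

theorem pvExpand_size (v : PvNode) :
    (((pvExpand v).2.map pvSize).sum) + 1 = pvSize v := by
  cases v with
  | bulk s => rfl
  | flat l => simp [pvExpand, pvSize]; induction l with
      | nil => rfl
      | cons a t ih => simp [pvSize] at *; omega
  | entry q => simp [pvExpand, pvSize]; omega
  | entries l => simp [pvExpand, pvSize]; induction l with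
      | nil => rfl
      | cons a t ih => simp [pvSize] at *; omega
  | stream p => simp [pvExpand, pvSize]; omega
  | streams l => simp [pvExpand, pvSize]; induction l with
      | nil => rfl
      | cons a t ih => simp [pvSize] at *; omega

-- the while loop: pop the top, emit its token, push its children
def pvRun : List PvNode → List String
  | [] => []
  | v :: rest => (pvExpand v).1 :: pvRun ((pvExpand v).2 ++ rest)
termination_by stack => (stack.map pvSize).sum
decreasing_by
  simp only [List.map_cons, List.map_append, List.sum_cons, List.sum_append]
  have := pvExpand_size v
  omega

def format_xread_data_alt (data : List (String × (List (String × (List (String × String)))))) : String :=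
  if data = [] then "*-1\r\n" else
  let tree : PvNode := .streams (data.map (fun p =>
    (p.1, p.2.map (fun q => (q.1, q.2.flatMap (fun kv => [kv.1, kv.2]))))))
  PySem.Str.join "" (pvRun [tree])

-- ===== PRECONDITION & SPEC =====
def Spec_format_xread_data (data : List (String × (List (String × (List (String × String)))))) (out : String) : Prop := out = format_xread_data_alt data
instance (data : List (String × (List (String × (List (String × String)))))) (out : String) : Decidable (Spec_format_xread_data data out) := by unfold Spec_format_xread_data; infer_instance

-- ===== CLAIM (what is proved, stated in full; the proofs are below) =====
def Claim_equal_format_xread_data : Prop := ∀ (data : List (String × (List (String × (List (String × String)))))), Dom_format_xread_data data → Spec_format_xread_data data (format_xread_data data)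


-- ===== LEMMAS AND PROOFS =====

theorem pv_join_cons (a : String) (l : List String) :
    PySem.Str.join "" (a :: l) = a ++ PySem.Str.join "" l := by
  cases l with
  | nil => simp [PySem.Str.join, PySem.Chars.join_singleton, PySem.Chars.join_nil]
  | cons b t => simp [PySem.Str.join, PySem.Chars.join_cons_cons]

theorem pv_join_pair (a b : String) : PySem.Str.join "" [a, b] = a ++ b := by
  rw [pv_join_cons, pv_join_cons]
  simp [PySem.Str.join, PySem.Chars.join_nil]

-- proof-side abbreviations for the two RESP syntactic forms
def pvBulk (s : String) : String :=
  "$" ++ PySem.Int.toStr (PySem.Str.len s) ++ "\r\n" ++ s ++ "\r\n"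

def pvArr (parts : List String) : String :=
  "*" ++ PySem.Int.toStr (PySem.List.len parts) ++ "\r\n" ++ PySem.Str.join "" parts

-- the accumulate-append loop shape equals init ++ "".join(map g l)
theorem pv_foldl_eq_join {alpha : Type} (F : String -> alpha -> String) (g : alpha -> String)
    (h : forall r x, F r x = r ++ g x) (l : List alpha) (s : String) :
    l.foldl F s = s ++ PySem.Str.join "" (l.map g) := by
  induction l generalizing s with
  | nil => simp [PySem.Str.join, PySem.Chars.join_nil]
  | cons x t ih =>
      rw [List.foldl_cons, h, ih, List.map_cons, pv_join_cons, String.append_assoc]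

-- the per-field / per-entry / per-stream chunks A appends
def pvFEncA (f : String × String) : String :=
  "$" ++ PySem.Int.toStr (PySem.Str.len f.1) ++ "\r\n" ++ f.1 ++ "\r\n$" ++ PySem.Int.toStr (PySem.Str.len f.2) ++ "\r\n" ++ f.2 ++ "\r\n"

def pvEEncA (q : String × List (String × String)) : String :=
  ("*2\r\n$" ++ PySem.Int.toStr (PySem.Str.len q.1) ++ "\r\n" ++ q.1 ++ "\r\n*" ++ PySem.Int.toStr (PySem.List.len q.2 * 2) ++ "\r\n") ++ PySem.Str.join "" (q.2.map pvFEncA)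

def pvSEncA (p : String × List (String × List (String × String))) : String :=
  ("*2\r\n$" ++ PySem.Int.toStr (PySem.Str.len p.1) ++ "\r\n" ++ p.1 ++ "\r\n*" ++ PySem.Int.toStr (PySem.List.len p.2) ++ "\r\n") ++ PySem.Str.join "" (p.2.map pvEEncA)

theorem pvA_closed (data : List (String × (List (String × (List (String × String)))))) (h : data ≠ []) :
    format_xread_data data =
      ("*" ++ PySem.Int.toStr (PySem.List.len data) ++ "\r\n") ++ PySem.Str.join "" (data.map pvSEncA) := by
  unfold format_xread_data
  rw [if_neg h]
  refine pv_foldl_eq_join _ pvSEncA ?_ data _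
  intro r p
  show p.2.foldl _ (r ++ _) = r ++ pvSEncA p
  refine (pv_foldl_eq_join _ pvEEncA ?_ p.2 _).trans ?_
  · intro r' q
    show q.2.foldl _ (r' ++ _) = r' ++ pvEEncA q
    refine (pv_foldl_eq_join _ pvFEncA ?_ q.2 _).trans ?_
    · intro r'' f; rfl
    · rw [pvEEncA, String.append_assoc]
  · rw [pvSEncA, String.append_assoc]

theorem pv_toChars_two : PySem.Int.toChars 2 = ['2'] := by decide

theorem pvFEncA_eq (f : String × String) : pvFEncA f = pvBulk f.1 ++ pvBulk f.2 := by
  apply String.toList_inj.mp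
  simp [pvFEncA, pvBulk]

theorem pv_join_flat (l : List (String × String)) :
    PySem.Str.join "" ((l.flatMap fun kv => [kv.1, kv.2]).map pvBulk) =
      PySem.Str.join "" (l.map pvFEncA) := by
  induction l with
  | nil => simp
  | cons a t ih =>
      rw [List.flatMap_cons, List.map_append, List.map_cons, List.map_cons, List.map_nil,
        List.cons_append, List.cons_append, List.nil_append, pv_join_cons, pv_join_cons,
        List.map_cons, pv_join_cons, ih, pvFEncA_eq, String.append_assoc]

theorem pv_flat_length (l : List (String × String)) :
    ((l.flatMap fun kv => [kv.1, kv.2]).length : Int) = PySem.List.len l * 2 := by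
  induction l with
  | nil => simp [PySem.List.len]
  | cons a t ih => simp [PySem.List.len] at ih ⊢; omega

-- the worklist is compositional: running a ++ b runs a then b
theorem pvSize_pos (v : PvNode) : 1 ≤ pvSize v := by
  cases v <;> simp [pvSize] <;> omega

theorem pvRun_append_aux : ∀ (n : Nat) (a b : List PvNode), (a.map pvSize).sum ≤ n →
    pvRun (a ++ b) = pvRun a ++ pvRun b := by
  intro n
  induction n with
  | zero =>
      intro a b h
      cases a with
      | nil => simp [pvRun]
      | cons v rest =>
          exfalso; have := pvSize_pos v
          simp [List.map_cons] at h; omega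
  | succ n ih =>
      intro a b h
      cases a with
      | nil => simp [pvRun]
      | cons v rest =>
          have h1 := pvExpand_size v
          simp only [List.map_cons, List.sum_cons] at h
          rw [List.cons_append, pvRun, pvRun, ← List.append_assoc,
            ih ((pvExpand v).2 ++ rest) b (by simp only [List.map_append, List.sum_append]; omega)]
          simp

theorem pvRun_append (a b : List PvNode) : pvRun (a ++ b) = pvRun a ++ pvRun b :=
  pvRun_append_aux ((a.map pvSize).sum) a b le_rfl

theorem pvRun_flatMap (st : List PvNode) : pvRun st = st.flatMap (fun v => pvRun [v]) := by
  induction st with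
  | nil => rw [pvRun]; rfl
  | cons v rest ih =>
      rw [show v :: rest = [v] ++ rest from rfl, pvRun_append, ih, List.flatMap_append,
        List.flatMap_cons, List.flatMap_nil, List.append_nil]

theorem pvRun_single (v : PvNode) : pvRun [v] = (pvExpand v).1 :: pvRun (pvExpand v).2 := by
  rw [pvRun, List.append_nil]

theorem pv_join_append (a b : List String) :
    PySem.Str.join "" (a ++ b) = PySem.Str.join "" a ++ PySem.Str.join "" b := by
  induction a with
  | nil => simp [PySem.Str.join, PySem.Chars.join_nil]
  | cons x t ih => rw [List.cons_append, pv_join_cons, pv_join_cons, ih, String.append_assoc]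

-- value of one node under the stack serializer
def pvJ (v : PvNode) : String := PySem.Str.join "" (pvRun [v])

theorem pvJ_expand (v : PvNode) :
    pvJ v = (pvExpand v).1 ++ PySem.Str.join "" ((pvExpand v).2.map (fun c => pvJ c)) := by
  rw [pvJ, pvRun_single, pv_join_cons, pvRun_flatMap]
  congr 1
  induction (pvExpand v).2 with
  | nil => rfl
  | cons c t ih => rw [List.flatMap_cons, pv_join_append, List.map_cons, pv_join_cons, ih, pvJ]

theorem pvJ_bulk (s : String) : pvJ (.bulk s) = pvBulk s := by
  rw [pvJ_expand]; simp [pvExpand, pvBulk, PySem.Str.join, PySem.Chars.join_nil]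

theorem pvJ_flat (l : List String) : pvJ (.flat l) = pvArr (l.map pvBulk) := by
  rw [pvJ_expand, pvArr]
  simp only [pvExpand]
  rw [PySem.List.len, PySem.List.len, List.length_map, List.map_map]
  congr 1
  exact congrArg (PySem.Str.join "") (by simp [Function.comp, pvJ_bulk])

theorem pvJ_entry (q : String × List String) :
    pvJ (.entry q) = pvArr [pvBulk q.1, pvArr (q.2.map pvBulk)] := by
  rw [pvJ_expand, pvArr]
  simp only [pvExpand]
  rw [PySem.List.len, PySem.List.len]
  rw [show (([q.1, ""] : List String).length : Int) = (([pvBulk q.1, pvArr (q.2.map pvBulk)] : List String).length : Int) by simp]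
  congr 1
  rw [List.map_cons, List.map_cons, List.map_nil, pvJ_bulk, pvJ_flat]

theorem pvJ_entries (l : List (String × List String)) :
    pvJ (.entries l) = pvArr (l.map (fun q => pvArr [pvBulk q.1, pvArr (q.2.map pvBulk)])) := by
  rw [pvJ_expand, pvArr]
  simp only [pvExpand]
  rw [PySem.List.len, PySem.List.len, List.length_map, List.map_map]
  congr 1
  exact congrArg (PySem.Str.join "") (by simp [Function.comp, pvJ_entry])

theorem pvJ_stream (p : String × List (String × List String)) :
    pvJ (.stream p) = pvArr [pvBulk p.1,
      pvArr (p.2.map (fun q => pvArr [pvBulk q.1, pvArr (q.2.map pvBulk)]))] := by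
  rw [pvJ_expand, pvArr]
  simp only [pvExpand]
  rw [PySem.List.len, PySem.List.len]
  rw [show (([p.1, ""] : List String).length : Int) = 2 by simp]
  rw [show ((([pvBulk p.1, _] : List String).length : Int)) = 2 by simp]
  congr 1
  rw [List.map_cons, List.map_cons, List.map_nil, pvJ_bulk, pvJ_entries]

theorem pvJ_streams (l : List (String × List (String × List String))) :
    pvJ (.streams l) = pvArr (l.map (fun p => pvJ (.stream p))) := by
  rw [pvJ_expand, pvArr]
  simp only [pvExpand]
  rw [PySem.List.len, PySem.List.len, List.length_map, List.map_map]
  congr 1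

-- B's tree value of one stream equals A's per-stream chunk
theorem pvEEncA_eq (q : String × List (String × String)) :
    pvEEncA q = pvArr [pvBulk q.1, pvArr ((q.2.flatMap fun kv => [kv.1, kv.2]).map pvBulk)] := by
  rw [pvArr, pv_join_pair, pvArr, pv_join_flat, PySem.List.len]
  rw [show ((([pvBulk q.1, _] : List String).length : Int)) = 2 by simp]
  rw [show PySem.List.len ((q.2.flatMap fun kv => [kv.1, kv.2]).map pvBulk) = PySem.List.len q.2 * 2 by
    rw [PySem.List.len, List.length_map, pv_flat_length, PySem.List.len]]
  apply String.toList_inj.mp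
  simp [pvEEncA, pvBulk, pv_toChars_two]

theorem pvStream_eq (p : String × List (String × List (String × String))) :
    pvJ (.stream (p.1, p.2.map (fun q => (q.1, q.2.flatMap (fun kv => [kv.1, kv.2]))))) = pvSEncA p := by
  have hmap : (p.2.map ((fun q => pvArr [pvBulk q.1, pvArr (q.2.map pvBulk)]) ∘
      (fun q => (q.1, q.2.flatMap (fun kv => [kv.1, kv.2]))))) = p.2.map pvEEncA :=
    List.map_congr_left fun q _ => (pvEEncA_eq q).symm
  rw [pvJ_stream, List.map_map, hmap]
  rw [pvArr, pv_join_pair, pvArr, PySem.List.len]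
  rw [show ((([pvBulk p.1, _] : List String).length : Int)) = 2 by simp]
  rw [show PySem.List.len (p.2.map pvEEncA) = PySem.List.len p.2 by
    rw [PySem.List.len, List.length_map, PySem.List.len]]
  apply String.toList_inj.mp
  simp [pvSEncA, pvBulk, pv_toChars_two]

-- ===== VERDICT (by name: the statement is the Claim_ definition above) =====
theorem format_xread_data_spec : Claim_equal_format_xread_data := by
  intro data _
  show format_xread_data data = format_xread_data_alt data
  by_cases h : data = []
  · subst h; rfl
  · rw [pvA_closed data h]
    unfold format_xread_data_alt
    rw [if_neg h]
    show _ = pvJ _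
    have hmap : (data.map ((fun p => pvJ (.stream p)) ∘
        (fun p => (p.1, p.2.map (fun q => (q.1, q.2.flatMap (fun kv => [kv.1, kv.2]))))))
        = data.map pvSEncA) :=
      List.map_congr_left fun p _ => pvStream_eq p
    rw [pvJ_streams, List.map_map, hmap]
    rw [pvArr]
    rw [show PySem.List.len (data.map pvSEncA) = PySem.List.len data by
      simp [PySem.List.len]]
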